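-- pv_equiv track=rewrite | github.com/kborodziuk01/bTB_model_herd_master | tools/console_out_results.py | chunk_and_relabel
-- ===== SOURCE A (Python) =====
-- def chunk_and_relabel(data, chunk_size=20, labels_cycle=("mb_4", "mb_5", "mb_6")):
--     chunks = [data[i:i + chunk_size] for i in range(0, len(data), chunk_size)]
--     updated_data = []
--
--
--     for idx, chunk in enumerate(chunks):
--         new_label_suffix = labels_cycle[idx % len(labels_cycle)]
--         for row in chunk:
--             row[0] = f"{row[0]}_{new_label_suffix}"
--             updated_data.append(row)
--
--     return updated_data
-- ===== SOURCE B (Python) =====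
-- def chunk_and_relabel(data, chunk_size=20, labels_cycle=("mb_4", "mb_5", "mb_6")):
--     n = len(labels_cycle)
--     starts = range(0, len(data), chunk_size)
--     flat_labels = [labels_cycle[k % n]
--                    for k in range(len(starts))
--                    for _ in range(min(chunk_size, len(data) - k * chunk_size))]
--     updated_data = []
--     for row, label in zip(data, flat_labels):
--         row[0] = f"{row[0]}_{label}"
--         updated_data.append(row)
--     return updated_data
-- ===== Notes on version B (the rewrite author's own statement) =====
-- stated objective: simpler
-- what changed: B never builds the chunks list or the nested loop: it expands the chunk labels into a flat per-row label stream (each label repeated chunk_size times) and zips it against the rows in a single pass.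
import Mathlib
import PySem

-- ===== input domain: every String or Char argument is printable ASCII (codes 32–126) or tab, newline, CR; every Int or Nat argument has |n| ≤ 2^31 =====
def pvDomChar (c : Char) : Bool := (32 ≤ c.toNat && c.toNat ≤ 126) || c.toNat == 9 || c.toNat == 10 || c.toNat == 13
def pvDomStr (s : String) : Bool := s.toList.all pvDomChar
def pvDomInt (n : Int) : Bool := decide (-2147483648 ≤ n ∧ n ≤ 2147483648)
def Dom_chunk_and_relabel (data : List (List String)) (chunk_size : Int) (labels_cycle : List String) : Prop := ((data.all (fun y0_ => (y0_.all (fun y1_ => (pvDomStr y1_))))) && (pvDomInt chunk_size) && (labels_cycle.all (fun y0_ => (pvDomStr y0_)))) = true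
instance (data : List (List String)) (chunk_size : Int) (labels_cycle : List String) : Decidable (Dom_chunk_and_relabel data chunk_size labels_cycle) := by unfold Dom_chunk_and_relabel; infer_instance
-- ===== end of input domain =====

-- B never chunks the data: it expands the chunk labels into a flat per-row label stream and zips it
-- against the rows in one pass (objective: simpler). Both A and B mutate the rows of `data` in
-- place in the same way; the equivalence proved here is about the return value.

-- ===== PORT A =====
def chunk_and_relabel (data : List (List String)) (chunk_size : Int) (labels_cycle : List String) : List (List String) :=
  let chunks := (PySem.List.pyRange 0 (data.length : Int) chunk_size).map
    (fun i => PySem.List.slice data (some i) (some (i + chunk_size)))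
  (PySem.List.enumerate chunks 0).foldl
    (fun updated_data p =>
      let new_label_suffix := PySem.List.pyGetD labels_cycle (PySem.Int.mod p.1 (labels_cycle.length : Int)) ""
      p.2.foldl
        (fun acc row =>
          let row' := PySem.List.pySetD row 0 (PySem.List.pyGetD row 0 "" ++ "_" ++ new_label_suffix)
          acc ++ [row']) updated_data) []

-- ===== PORT B =====
def chunk_and_relabel_alt (data : List (List String)) (chunk_size : Int) (labels_cycle : List String) : List (List String) :=
  let n : Int := labels_cycle.length
  let starts := PySem.List.pyRange 0 (data.length : Int) chunk_size
  let flat_labels := (PySem.List.pyRange 0 (starts.length : Int) 1).flatMap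
    (fun k => (PySem.List.pyRange 0 (min chunk_size ((data.length : Int) - k * chunk_size)) 1).map
      (fun _ => PySem.List.pyGetD labels_cycle (PySem.Int.mod k n) ""))
  (data.zip flat_labels).foldl
    (fun updated_data p =>
      let row' := PySem.List.pySetD p.1 0 (PySem.List.pyGetD p.1 0 "" ++ "_" ++ p.2)
      updated_data ++ [row']) []

-- ===== PRECONDITION & SPEC =====
-- Pre_ excludes exactly the inputs on which Python A raises: chunk_size = 0 (range(0, len, 0) is a
-- ValueError) and, for positive chunk_size and nonempty data, empty labels_cycle
-- (ZeroDivisionError in idx % len) and empty rows (row[0] is an IndexError).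
def Pre_chunk_and_relabel (data : List (List String)) (chunk_size : Int) (labels_cycle : List String) : Prop :=
  chunk_size ≠ 0 ∧ (0 < chunk_size → data ≠ [] → (labels_cycle ≠ [] ∧ ∀ row ∈ data, row ≠ []))
instance (data : List (List String)) (chunk_size : Int) (labels_cycle : List String) : Decidable (Pre_chunk_and_relabel data chunk_size labels_cycle) := by unfold Pre_chunk_and_relabel; infer_instance

def pvWitness_chunk_and_relabel : List (List String) × Int × List String :=
  ([["a", "1"], ["b", "2"], ["c", "3"]], 2, ["x", "y"])

def Spec_chunk_and_relabel (data : List (List String)) (chunk_size : Int) (labels_cycle : List String) (out : List (List String)) : Prop := out = chunk_and_relabel_alt data chunk_size labels_cycle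
instance (data : List (List String)) (chunk_size : Int) (labels_cycle : List String) (out : List (List String)) : Decidable (Spec_chunk_and_relabel data chunk_size labels_cycle out) := by unfold Spec_chunk_and_relabel; infer_instance

-- ===== CLAIM (what is proved, stated in full; the proofs are below) =====
def Claim_equal_chunk_and_relabel : Prop := ∀ (data : List (List String)) (chunk_size : Int) (labels_cycle : List String), Dom_chunk_and_relabel data chunk_size labels_cycle → Pre_chunk_and_relabel data chunk_size labels_cycle → Spec_chunk_and_relabel data chunk_size labels_cycle (chunk_and_relabel data chunk_size labels_cycle)

-- ===== LEMMAS AND PROOFS =====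

-- the common relabelling of one row: new first cell "row[0]_label"
def pvRel (labels : List String) (j : ℕ) (row : List String) : List String :=
  PySem.List.pySetD row 0 (PySem.List.pyGetD row 0 "" ++ "_" ++ labels.getD j "")

-- common normal form of both programs: flat pass, row at global position i gets label (i / cs) % n
def pvRelGo (cs n : ℕ) (labels : List String) : ℕ → List (List String) → List (List String)
  | _, [] => []
  | i, row :: rest => pvRel labels (i / cs % n) row :: pvRelGo cs n labels (i + 1) rest

-- Python's range(0, L, cs) for positive cs has ceil(L/cs) elements
theorem pvCnt (cs : ℕ) (hcs : 0 < cs) (L : ℕ) :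
    (if (0 : Int) < (L : Int) then (((L : Int) - 0 + (cs : Int) - 1) / (cs : Int)).toNat else 0)
      = (L + cs - 1) / cs := by
  by_cases h : 0 < L
  · rw [if_pos (by exact_mod_cast h)]
    have h1 : ((L : Int) - 0 + (cs : Int) - 1) = ((L + cs - 1 : ℕ) : Int) := by
      push_cast [Nat.cast_sub (by omega : 1 ≤ L + cs)]; ring
    rw [h1, ← Int.natCast_div, Int.toNat_natCast]
  · have h0 : L = 0 := by omega
    rw [if_neg (by simp [h0]), h0]
    rw [Nat.div_eq_of_lt (by omega)]

theorem pvStarts_len (cs : ℕ) (hcs : 0 < cs) (L : ℕ) :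
    (PySem.List.pyRange 0 (L : Int) (cs : Int)).length = (L + cs - 1) / cs := by
  rw [PySem.List.pyRange_of_pos 0 (L : Int) (by exact_mod_cast hcs)]
  rw [List.length_map, List.length_range]
  exact pvCnt cs hcs L

theorem pvRelGo_split_aux (cs n : ℕ) (labels : List String) (hcs : 0 < cs) :
    ∀ (d : List (List String)) (k0 j : ℕ), j < cs →
      pvRelGo cs n labels (cs * k0 + j) d
        = (d.take (cs - j)).map (pvRel labels (k0 % n)) ++ pvRelGo cs n labels (cs * (k0 + 1)) (d.drop (cs - j)) := by
  intro d
  induction d with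
  | nil => intro k0 j hj; simp [pvRelGo]
  | cons row rest ih =>
    intro k0 j hj
    have hdiv : (cs * k0 + j) / cs = k0 := by
      rw [Nat.mul_add_div hcs, Nat.div_eq_of_lt hj, Nat.add_zero]
    by_cases hj1 : j + 1 < cs
    · have htk : cs - j = (cs - (j + 1)) + 1 := by omega
      rw [htk]
      simp only [pvRelGo, hdiv, List.take_succ_cons, List.drop_succ_cons, List.map_cons,
        List.cons_append]
      have := ih k0 (j + 1) hj1
      rw [← Nat.add_assoc] at this
      rw [this]
    · have htk : cs - j = 1 := by omega
      have hidx : cs * k0 + j + 1 = cs * (k0 + 1) := by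
        have : cs * (k0 + 1) = cs * k0 + cs := by ring
        omega
      simp only [pvRelGo, hdiv, htk, List.take_succ_cons, List.take_zero, List.drop_succ_cons,
        List.drop_zero, List.map_cons, List.map_nil, List.cons_append, List.nil_append, hidx]

theorem pvRelGo_split (cs n : ℕ) (labels : List String) (hcs : 0 < cs) :
    ∀ (d : List (List String)) (k0 : ℕ),
      pvRelGo cs n labels (cs * k0) d
        = (d.take cs).map (pvRel labels (k0 % n)) ++ pvRelGo cs n labels (cs * (k0 + 1)) (d.drop cs) := by
  intro d k0
  have := pvRelGo_split_aux cs n labels hcs d k0 0 hcs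
  simpa using this

-- arithmetic of the chunk count when one chunk is peeled off
theorem pvCnt_succ (cs : ℕ) (hcs : 0 < cs) (L : ℕ) (hL : 0 < L) :
    (L + cs - 1) / cs = (L - cs + cs - 1) / cs + 1 := by
  have h1 : L + cs - 1 = (L - 1) + cs := by omega
  rw [h1, Nat.add_div_right _ hcs]
  by_cases h : L ≤ cs
  · have h2 : L - cs = 0 := by omega
    rw [h2, Nat.div_eq_of_lt (by omega), Nat.div_eq_of_lt (by omega)]
  · have h3 : L - cs + cs - 1 = (L - cs - 1) + cs := by omega
    have h4 : L - 1 = (L - cs - 1) + cs := by omega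
    rw [h3, h4, Nat.add_div_right _ hcs]

-- ---------- the A side ----------

-- A's chunk list [data[i:i+cs] for i in range(0, len(data), cs)] in Nat form
def pvChunks (cs : ℕ) (d : List (List String)) : List (List (List String)) :=
  (List.range ((d.length + cs - 1) / cs)).map (fun k => (d.drop (cs * k)).take cs)

theorem pvChunks_eq (cs : ℕ) (hcs : 0 < cs) (d : List (List String)) :
    (PySem.List.pyRange 0 (d.length : Int) (cs : Int)).map
        (fun i => PySem.List.slice d (some i) (some (i + (cs : Int))))
      = pvChunks cs d := by
  rw [PySem.List.pyRange_of_pos 0 (d.length : Int) (by exact_mod_cast hcs)]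
  rw [pvCnt cs hcs d.length, pvChunks, List.map_map]
  refine List.map_congr_left (fun k _ => ?_)
  have h2 : (0 : Int) + (cs : Int) * (k : Int) = ((cs * k : ℕ) : Int) := by push_cast; ring
  simp only [Function.comp_apply, h2]
  exact PySem.List.slice_natCast_add d (cs * k) cs

theorem pvChunks_cons (cs : ℕ) (hcs : 0 < cs) (d : List (List String)) (hd : d ≠ []) :
    pvChunks cs d = d.take cs :: pvChunks cs (d.drop cs) := by
  have hL : 0 < d.length := List.length_pos_iff.mpr hd
  have hcnt : (d.length + cs - 1) / cs = ((d.drop cs).length + cs - 1) / cs + 1 := by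
    rw [List.length_drop]; exact pvCnt_succ cs hcs d.length hL
  rw [pvChunks, pvChunks, hcnt, List.range_succ_eq_map, List.map_cons, List.map_map]
  simp only [List.cons.injEq]
  refine ⟨by simp, ?_⟩
  simp only [List.map_inj_left, Function.comp_apply]
  intro a ha
  have h3 : cs * (a + 1) = cs + cs * a := by ring
  simp [List.drop_drop, h3]

theorem pvA_eq_relGo_fuel (cs n : ℕ) (labels : List String) (hcs : 0 < cs) :
    ∀ (m : ℕ) (d : List (List String)), d.length ≤ m → ∀ (k0 : ℕ) (acc : List (List String)),
      (PySem.List.enumerate (pvChunks cs d) (k0 : Int)).foldl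
        (fun updated_data p =>
          p.2.foldl
            (fun acc2 row =>
              acc2 ++ [PySem.List.pySetD row 0 (PySem.List.pyGetD row 0 "" ++ "_" ++
                PySem.List.pyGetD labels (PySem.Int.mod p.1 (n : Int)) "")]) updated_data) acc
      = acc ++ pvRelGo cs n labels (cs * k0) d := by
  intro m
  induction m with
  | zero =>
    intro d hd k0 acc
    have hnil : d = [] := List.eq_nil_of_length_eq_zero (by omega)
    subst hnil
    simp [pvChunks, pvRelGo, show (cs - 1) / cs = 0 from Nat.div_eq_of_lt (by omega)]
  | succ m ih =>
    intro d hd k0 acc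
    by_cases hnil : d = []
    · subst hnil
      simp [pvChunks, pvRelGo, show (cs - 1) / cs = 0 from Nat.div_eq_of_lt (by omega)]
    · rw [pvChunks_cons cs hcs d hnil, PySem.List.enumerate_cons, List.foldl_cons]
      have hlen : (d.drop cs).length ≤ m := by
        rw [List.length_drop]
        have : 0 < d.length := List.length_pos_iff.mpr hnil
        omega
      have h1 : ((k0 : Int) + 1) = ((k0 + 1 : ℕ) : Int) := by push_cast; ring
      rw [h1, ih (d.drop cs) hlen (k0 + 1)]
      rw [PySem.List.foldl_append_singleton_eq_map]
      rw [pvRelGo_split cs n labels hcs d k0, ← List.append_assoc]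
      congr 2
      refine List.map_congr_left (fun row _ => ?_)
      simp only [pvRel, PySem.Int.mod_natCast, PySem.List.pyGetD_natCast, List.getD]

-- ---------- the B side ----------

-- zipping rows against a block of m equal labels peels off m rows
theorem pvZipRep (F : List String × String → List String) :
    ∀ (m : ℕ) (d : List (List String)) (x : String) (rest : List String),
      ((d.zip (List.replicate m x ++ rest)).map F)
        = (d.take m).map (fun r => F (r, x)) ++ ((d.drop m).zip rest).map F := by
  intro m
  induction m with
  | zero => intro d x rest; simp
  | succ m ih =>
    intro d x rest
    cases d with
    | nil => simp
    | cons r d' => simp [List.replicate_succ, ih d' x rest]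

theorem pvTakeMin (cs : ℕ) (d : List (List String)) : d.take (min cs d.length) = d.take cs := by
  rcases Nat.le_total cs d.length with h | h
  · rw [Nat.min_eq_left h]
  · rw [Nat.min_eq_right h, List.take_length, List.take_of_length_le h]

theorem pvDropMin (cs : ℕ) (d : List (List String)) : d.drop (min cs d.length) = d.drop cs := by
  rcases Nat.le_total cs d.length with h | h
  · rw [Nat.min_eq_left h]
  · rw [Nat.min_eq_right h, List.drop_length, List.drop_eq_nil_of_le h]

theorem pvB_eq_relGo_fuel (cs n : ℕ) (labels : List String) (hcs : 0 < cs) :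
    ∀ (m : ℕ) (d : List (List String)), d.length ≤ m → ∀ (k0 : ℕ),
      ((d.zip ((List.range ((d.length + cs - 1) / cs)).flatMap
          (fun k => List.replicate (min cs (d.length - cs * k)) (labels.getD ((k0 + k) % n) "")))).map
        (fun p => PySem.List.pySetD p.1 0 (PySem.List.pyGetD p.1 0 "" ++ "_" ++ p.2)))
      = pvRelGo cs n labels (cs * k0) d := by
  intro m
  induction m with
  | zero =>
    intro d hd k0
    have hnil : d = [] := List.eq_nil_of_length_eq_zero (by omega)
    subst hnil
    rfl
  | succ m ih =>
    intro d hd k0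
    by_cases hnil : d = []
    · subst hnil; rfl
    · have hL : 0 < d.length := List.length_pos_iff.mpr hnil
      have hcnt : (d.length + cs - 1) / cs = ((d.drop cs).length + cs - 1) / cs + 1 := by
        rw [List.length_drop]; exact pvCnt_succ cs hcs d.length hL
      rw [hcnt, List.range_succ_eq_map, List.flatMap_cons, List.flatMap_map]
      simp only [Nat.succ_eq_add_one, Nat.add_zero, Nat.mul_zero, Nat.sub_zero]
      rw [pvZipRep, pvTakeMin, pvDropMin]
      have hlen : (d.drop cs).length ≤ m := by
        rw [List.length_drop]; omega
      have ihd := ih (d.drop cs) hlen (k0 + 1)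
      simp only [List.length_drop] at ihd
      have hsh : ∀ k : ℕ, (k0 + 1) + k = k0 + (k + 1) := fun k => by omega
      have hsub : ∀ k : ℕ, d.length - cs - cs * k = d.length - cs * (k + 1) := fun k => by
        have : cs * (k + 1) = cs * k + cs := by ring
        omega
      simp only [hsh, hsub] at ihd
      simp only [List.length_drop]
      rw [ihd]
      rw [pvRelGo_split cs n labels hcs d k0]
      rfl

-- B with a nonpositive step or empty data: the label stream is empty, so B returns []
theorem pvB_deg (data : List (List String)) (chunk_size : Int) (labels_cycle : List String)
    (h : PySem.List.pyRange 0 (data.length : Int) chunk_size = []) :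
    chunk_and_relabel_alt data chunk_size labels_cycle = [] := by
  simp [chunk_and_relabel_alt, h, PySem.List.pyRange_zero]

-- A with a negative step: range(0, len, chunk_size) is empty, so A returns []
theorem pvA_deg (data : List (List String)) (chunk_size : Int) (labels_cycle : List String)
    (h : PySem.List.pyRange 0 (data.length : Int) chunk_size = []) :
    chunk_and_relabel data chunk_size labels_cycle = [] := by
  simp [chunk_and_relabel, h, PySem.List.enumerate_nil]

theorem pvRange_neg_nil (L : ℕ) (chunk_size : Int) (hneg : chunk_size < 0) :
    PySem.List.pyRange 0 (L : Int) chunk_size = [] := by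
  simp only [PySem.List.pyRange]
  rw [if_neg (by omega), if_neg (by omega), if_neg (by omega)]
  simp

-- ===== VERDICT (by name: the statement is the Claim_ definition above) =====
theorem chunk_and_relabel_spec : Claim_equal_chunk_and_relabel := by
  intro data chunk_size labels_cycle _ hpre
  show chunk_and_relabel data chunk_size labels_cycle = chunk_and_relabel_alt data chunk_size labels_cycle
  obtain ⟨hne, himp⟩ := hpre
  rcases lt_trichotomy chunk_size 0 with hneg | hz | hpos
  · rw [pvA_deg data chunk_size labels_cycle (pvRange_neg_nil data.length chunk_size hneg),
      pvB_deg data chunk_size labels_cycle (pvRange_neg_nil data.length chunk_size hneg)]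
  · exact absurd hz hne
  · by_cases hd : data = []
    · subst hd
      simp [chunk_and_relabel, chunk_and_relabel_alt, PySem.List.pyRange, PySem.List.enumerate_nil]
    · set cs := chunk_size.toNat with hcsdef
      have hcs : 0 < cs := by omega
      have hcseq : chunk_size = (cs : Int) := by omega
      set n := labels_cycle.length with hndef
      -- the A side
      have hA := pvA_eq_relGo_fuel cs n labels_cycle hcs data.length data le_rfl 0 []
      simp only [Nat.cast_zero, Nat.mul_zero, List.nil_append] at hA
      have eA : chunk_and_relabel data chunk_size labels_cycle = pvRelGo cs n labels_cycle 0 data := by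
        simp only [chunk_and_relabel]
        rw [hcseq, pvChunks_eq cs hcs data]
        exact hA
      -- the B side: normalise the flat label stream, then apply the fuel lemma
      have hB := pvB_eq_relGo_fuel cs n labels_cycle hcs data.length data le_rfl 0
      simp only [Nat.mul_zero, Nat.zero_add] at hB
      have eB : chunk_and_relabel_alt data chunk_size labels_cycle = pvRelGo cs n labels_cycle 0 data := by
        simp only [chunk_and_relabel_alt]
        rw [hcseq, PySem.List.foldl_append_singleton_eq_map]
        rw [pvStarts_len cs hcs data.length]
        have hflat : (PySem.List.pyRange 0 (((data.length + cs - 1) / cs : ℕ) : Int) 1).flatMap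
            (fun k => (PySem.List.pyRange 0 (min ((cs : ℕ) : Int) ((data.length : Int) - k * ((cs : ℕ) : Int))) 1).map
              (fun _ => PySem.List.pyGetD labels_cycle (PySem.Int.mod k (n : Int)) ""))
            = (List.range ((data.length + cs - 1) / cs)).flatMap
              (fun k => List.replicate (min cs (data.length - cs * k)) (labels_cycle.getD (k % n) "")) := by
          rw [PySem.List.pyRange_zero_natCast, List.flatMap_map]
          refine List.flatMap_congr (fun k _ => ?_)
          have hmul : ((k : ℕ) : Int) * ((cs : ℕ) : Int) = ((cs * k : ℕ) : Int) := by
            push_cast; ring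
          rw [PySem.Int.mod_natCast, PySem.List.pyGetD_natCast, hmul, PySem.List.pyRange_one]
          simp [Function.comp_def, List.map_const', List.getD]
          rw [show ((data.length : Int) - ((cs : ℕ) : Int) * ((k : ℕ) : Int))
              = ((data.length : Int) - ((cs * k : ℕ) : Int)) from by push_cast; ring]
          omega
        rw [hflat]
        simpa using hB
      rw [eA, eB]
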